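-- pv_equiv track=rewrite | github.com/Jerempire/gym-anything | benchmarks/cua_world/environments/solvespace_env/tasks/symmetric_trapezoid_channel/verifier.py | parse_slvs
-- ===== SOURCE A (Python) =====
-- def parse_slvs(content):
--     """Robust state-machine parser for .slvs files."""
--     entities = []
--     constraints = []
--
--     lines = content.split('\n')
--     current_item = {}
--
--     for line in lines:
--         line = line.strip()
--         if not line:
--             continue
--
--         if line == 'AddEntity':
--             entities.append(current_item)
--             current_item = {}
--         elif line == 'AddConstraint':
--             constraints.append(current_item)
--             current_item = {}
--         elif line.startswith('Add'):
--             current_item = {}  # reset for other items like AddGroup, AddParam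
--         elif '=' in line:
--             parts = line.split('=', 1)
--             if len(parts) == 2:
--                 current_item[parts[0]] = parts[1]
--
--     return entities, constraints
-- ===== SOURCE B (Python) =====
-- def parse_slvs(content):
--     """Robust state-machine parser for .slvs files."""
--     # Segmentation algorithm: scan for marker lines ('Add...'); each marker closes the
--     # segment of lines since the previous marker, and a block dict is built from that
--     # segment only when the marker keeps it. Trailing lines after the last marker drop.
--     lines = [raw.strip() for raw in content.split('\n')]
--     entities, constraints = [], []
--     i, n = 0, len(lines)
--     while i < n:
--         j = i
--         while j < n and not lines[j].startswith('Add'):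
--             j += 1
--         if j == n:
--             break
--         marker = lines[j]
--         if marker == 'AddEntity':
--             entities.append(dict(f.split('=', 1) for f in lines[i:j] if '=' in f))
--         elif marker == 'AddConstraint':
--             constraints.append(dict(f.split('=', 1) for f in lines[i:j] if '=' in f))
--         i = j + 1
--     return entities, constraints
-- ===== Notes on version B (the rewrite author's own statement) =====
-- stated objective: alternative
-- what changed: Replaces A's line-by-line state machine carrying a running current_item dict with a segmentation algorithm: scan for the next marker line, slice out the segment of lines since the previous marker, and build the block dict from that slice only when the marker is AddEntity/AddConstraint.
import Mathlib
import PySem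

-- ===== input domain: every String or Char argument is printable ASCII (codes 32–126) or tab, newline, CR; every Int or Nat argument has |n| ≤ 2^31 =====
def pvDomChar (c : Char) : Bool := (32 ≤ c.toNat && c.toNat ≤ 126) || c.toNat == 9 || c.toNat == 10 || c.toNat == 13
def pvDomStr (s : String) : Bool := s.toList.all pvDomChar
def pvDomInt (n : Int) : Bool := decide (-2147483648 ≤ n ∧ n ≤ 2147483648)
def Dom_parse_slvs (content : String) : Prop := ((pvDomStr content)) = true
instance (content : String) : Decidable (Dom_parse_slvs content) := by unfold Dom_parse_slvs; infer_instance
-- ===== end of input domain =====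

-- B replaces A's running-accumulator state machine by marker segmentation: find each marker
-- line, slice out the lines since the previous marker, and build a dict from that slice only
-- for kept markers (objective: alternative algorithm; same behaviour, same cost).

-- ===== PORT A =====
-- A's loop body on the already-stripped line; state (entities, constraints, current_item)
def pvAStep0 (st : List (List (String × String)) × List (List (String × String)) × PySem.Dict String String)
    (line : String) :
    List (List (String × String)) × List (List (String × String)) × PySem.Dict String String :=
  if line = "" then st
  else if line = "AddEntity" then (st.1 ++ [st.2.2.items], st.2.1, PySem.Dict.empty)
  else if line = "AddConstraint" then (st.1, st.2.1 ++ [st.2.2.items], PySem.Dict.empty)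
  else if PySem.Str.startswith line "Add" then (st.1, st.2.1, PySem.Dict.empty)
  else if PySem.Str.isIn "=" line then
    match (PySem.Str.splitMax? line "=" 1).getD [] with
    | [k, v] => (st.1, st.2.1, st.2.2.insert k v)     -- len(parts) == 2
    | _ => st                                          -- len(parts) ≠ 2: no assignment
  else st

def pvAStep (st : List (List (String × String)) × List (List (String × String)) × PySem.Dict String String)
    (raw : String) :
    List (List (String × String)) × List (List (String × String)) × PySem.Dict String String :=
  pvAStep0 st (PySem.Str.strip raw)     -- line = line.strip()

def parse_slvs (content : String) : (List (List (String × String))) × (List (List (String × String))) :=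
  let r := ((PySem.Str.split? content "\n").getD []).foldl pvAStep ([], [], PySem.Dict.empty)
  (r.1, r.2.1)

-- ===== PORT B =====
def pvIsMarker (l : String) : Bool := PySem.Str.startswith l "Add"

-- dict(f.split('=', 1) for f in seg if '=' in f): each item is a 2-element list since '=' ∈ f
def pvPairStep (d : PySem.Dict String String) (f : String) : PySem.Dict String String :=
  match (PySem.Str.splitMax? f "=" 1).getD [] with
  | [k, v] => d.insert k v
  | _ => d                                             -- unreachable: '=' ∈ f gives 2 parts

def pvBlock (seg : List String) : List (String × String) :=
  ((seg.filter (fun f => PySem.Str.isIn "=" f)).foldl pvPairStep PySem.Dict.empty).items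

-- inner while: j += 1 while j < n and lines[j] is no marker
def pvScan (lines : List String) (j : Nat) : Nat :=
  if _h : j < lines.length ∧ pvIsMarker (lines.getD j "") = false then
    pvScan lines (j + 1)
  else j
  termination_by lines.length - j
  decreasing_by omega

theorem pvScan_ge (lines : List String) (j : Nat) : j ≤ pvScan lines j := by
  fun_induction pvScan with
  | case1 j h ih => omega
  | case2 j h => omega

-- outer while over the index i
def pvBGoI (lines : List String) (i : Nat)
    (es cs : List (List (String × String))) :
    (List (List (String × String))) × (List (List (String × String))) :=
  if _hi : i < lines.length then
    let j := pvScan lines i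
    if _hj : j < lines.length then
      let marker := lines.getD j ""
      let seg := PySem.List.slice lines (some (i : Int)) (some (j : Int))   -- lines[i:j]
      let es' := if marker = "AddEntity" then es ++ [pvBlock seg] else es
      let cs' := if marker ≠ "AddEntity" ∧ marker = "AddConstraint" then cs ++ [pvBlock seg] else cs
      pvBGoI lines (j + 1) es' cs'
    else (es, cs)                                      -- if j == n: break
  else (es, cs)
  termination_by lines.length - i
  decreasing_by have := pvScan_ge lines i; omega

def parse_slvs_alt (content : String) : (List (List (String × String))) × (List (List (String × String))) :=
  let lines := ((PySem.Str.split? content "\n").getD []).map PySem.Str.strip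
  pvBGoI lines 0 [] []

-- ===== PRECONDITION & SPEC =====
def Spec_parse_slvs (content : String) (out : (List (List (String × String))) × (List (List (String × String)))) : Prop := out = parse_slvs_alt content
instance (content : String) (out : (List (List (String × String))) × (List (List (String × String)))) : Decidable (Spec_parse_slvs content out) := by unfold Spec_parse_slvs; infer_instance

-- ===== CLAIM =====
def Claim_equal_parse_slvs : Prop := ∀ (content : String), Dom_parse_slvs content → Spec_parse_slvs content (parse_slvs content)

-- ===== LEMMAS AND PROOFS =====

theorem pvScan_le (lines : List String) (j : Nat) (h : j ≤ lines.length) :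
    pvScan lines j ≤ lines.length := by
  fun_induction pvScan with
  | case1 j h' ih => exact ih (by omega)
  | case2 j h' => omega

theorem pvScan_marker (lines : List String) (j : Nat)
    (h : pvScan lines j < lines.length) :
    pvIsMarker (lines.getD (pvScan lines j) "") = true := by
  fun_induction pvScan with
  | case1 j h' ih => exact ih h
  | case2 j h' =>
    by_cases hj : j < lines.length
    · simpa [hj] using h'
    · omega

theorem pvScan_nonmarker (lines : List String) (j m : Nat)
    (hm1 : j ≤ m) (hm2 : m < pvScan lines j) :
    pvIsMarker (lines.getD m "") = false := by
  fun_induction pvScan with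
  | case1 j h' ih =>
    by_cases he : m = j
    · subst he; exact h'.2
    · exact ih (by omega) hm2
  | case2 j h' => omega

-- a non-marker stripped line only touches current_item, as the dict step
def pvDictStep (d : PySem.Dict String String) (l : String) : PySem.Dict String String :=
  if PySem.Str.isIn "=" l then pvPairStep d l else d

theorem pvAStep0_nonmarker
    (st : List (List (String × String)) × List (List (String × String)) × PySem.Dict String String)
    (l : String) (h : pvIsMarker l = false) :
    pvAStep0 st l = (st.1, st.2.1, pvDictStep st.2.2 l) := by
  have h1 : l ≠ "AddEntity" := by rintro rfl; exact absurd h (by decide)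
  have h2 : l ≠ "AddConstraint" := by rintro rfl; exact absurd h (by decide)
  by_cases h0 : l = ""
  · subst h0
    simp [pvAStep0, pvDictStep, (by decide : PySem.Chars.isIn ['='] [] = false)]
  · simp only [pvIsMarker] at h
    unfold pvAStep0 pvDictStep pvPairStep
    simp only [h0, h1, h2, h, if_false, Bool.false_eq_true]
    split <;> rename_i hin
    · split <;> rfl
    · rfl

-- A's fold over a marker-free segment only accumulates the dict
theorem pvFoldA_seg (seg : List String) (hseg : ∀ l ∈ seg, pvIsMarker l = false)
    (es cs : List (List (String × String))) (d : PySem.Dict String String) :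
    seg.foldl pvAStep0 (es, cs, d) = (es, cs, seg.foldl pvDictStep d) := by
  induction seg generalizing d with
  | nil => rfl
  | cons l ls ih =>
    have hl := hseg l (by simp)
    rw [List.foldl_cons, pvAStep0_nonmarker _ _ hl, ih (fun x hx => hseg x (by simp [hx]))]
    rfl

theorem pvBlock_eq (seg : List String) :
    pvBlock seg = (seg.foldl pvDictStep PySem.Dict.empty).items := by
  unfold pvBlock pvDictStep
  rw [List.foldl_filter]

-- MAIN invariant: A's fold over the suffix from i (with empty current dict) matches B's index loop
theorem pvMain (lines : List String) (i : Nat) (hi : i ≤ lines.length)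
    (es cs : List (List (String × String))) :
    (((lines.drop i).foldl pvAStep0 (es, cs, PySem.Dict.empty)).1,
     ((lines.drop i).foldl pvAStep0 (es, cs, PySem.Dict.empty)).2.1) = pvBGoI lines i es cs := by
  induction hfuel : lines.length - i using Nat.strong_induction_on generalizing i es cs with
  | _ fuel ih =>
  by_cases hlt : i < lines.length
  · set j := pvScan lines i with hj
    have hij : i ≤ j := pvScan_ge lines i
    have hjle : j ≤ lines.length := pvScan_le lines i (by omega)
    have hseg : ∀ l ∈ (lines.drop i).take (j - i), pvIsMarker l = false := by
      intro l hl
      obtain ⟨m, hm, hget⟩ := List.mem_iff_getElem.mp hl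
      have hmlen : m < j - i := by
        have := hl; have hlen := List.length_take_le (j - i) (lines.drop i)
        exact lt_of_lt_of_le hm hlen
      have : l = lines[i + m]'(by omega) := by
        rw [← hget]; simp [List.getElem_take, List.getElem_drop]
      rw [this]
      have := pvScan_nonmarker lines i (i + m) (by omega) (by omega)
      simpa [List.getD_eq_getElem?_getD, List.getElem?_eq_getElem (by omega : i + m < lines.length)] using this
    have hsplit : lines.drop i = (lines.drop i).take (j - i) ++ lines.drop j := by
      conv_lhs => rw [← List.take_append_drop (j - i) (lines.drop i)]
      rw [List.drop_drop]
      congr 2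
      omega
    rw [hsplit, List.foldl_append, pvFoldA_seg _ hseg]
    by_cases hjlt : j < lines.length
    · have hdropj : lines.drop j = lines[j]'hjlt :: lines.drop (j + 1) :=
        List.drop_eq_getElem_cons hjlt
      have hgetD : lines.getD j "" = lines[j]'hjlt := by
        simp [List.getD_eq_getElem?_getD, List.getElem?_eq_getElem hjlt]
      have hmk : pvIsMarker (lines[j]'hjlt) = true := by
        have := pvScan_marker lines i (by rw [← hj]; exact hjlt)
        rwa [← hj, hgetD] at this
      have hBG : pvBGoI lines i es cs =
          pvBGoI lines (j + 1)
            (if lines[j]'hjlt = "AddEntity" then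
              es ++ [((lines.drop i).take (j - i)).foldl pvDictStep PySem.Dict.empty |>.items] else es)
            (if lines[j]'hjlt ≠ "AddEntity" ∧ lines[j]'hjlt = "AddConstraint" then
              cs ++ [((lines.drop i).take (j - i)).foldl pvDictStep PySem.Dict.empty |>.items] else cs) := by
        rw [pvBGoI]
        simp only [hlt, dif_pos, ← hj, hjlt, hgetD]
        rw [PySem.List.slice_natCast, pvBlock_eq]
      rw [hBG, hdropj, List.foldl_cons]
      set D := ((lines.drop i).take (j - i)).foldl pvDictStep PySem.Dict.empty with hD
      by_cases he : lines[j]'hjlt = "AddEntity"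
      · have hstep : pvAStep0 (es, cs, D) (lines[j]'hjlt) = (es ++ [D.items], cs, PySem.Dict.empty) := by
          rw [he]
          simp [pvAStep0, (by decide : ¬ ("AddEntity" : String) = "")]
        rw [hstep, he, if_pos rfl,
          if_neg (show ¬ (("AddEntity" : String) ≠ "AddEntity" ∧ ("AddEntity" : String) = "AddConstraint") by simp)]
        exact ih (lines.length - (j + 1)) (by omega) (j + 1) (by omega) (es ++ [D.items]) cs rfl
      · by_cases hc : lines[j]'hjlt = "AddConstraint"
        · have hstep : pvAStep0 (es, cs, D) (lines[j]'hjlt) = (es, cs ++ [D.items], PySem.Dict.empty) := by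
            rw [hc]
            simp [pvAStep0, (by decide : ¬ ("AddConstraint" : String) = ""),
              (by decide : ¬ ("AddConstraint" : String) = "AddEntity")]
          rw [hstep]
          rw [if_neg he, if_pos ⟨he, hc⟩]
          exact ih (lines.length - (j + 1)) (by omega) (j + 1) (by omega) es (cs ++ [D.items]) rfl
        · have hne : ¬ (lines[j]'hjlt) = "" := by
            intro h0; rw [h0] at hmk; exact absurd hmk (by decide)
          have hstep : pvAStep0 (es, cs, D) (lines[j]'hjlt) = (es, cs, PySem.Dict.empty) := by
            unfold pvAStep0
            simp only [hne, he, hc, if_false]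
            rw [if_pos]
            simpa [pvIsMarker] using hmk
          rw [hstep]
          rw [if_neg he, if_neg (show ¬ ((lines[j]'hjlt) ≠ "AddEntity" ∧ (lines[j]'hjlt) = "AddConstraint") by tauto)]
          exact ih (lines.length - (j + 1)) (by omega) (j + 1) (by omega) es cs rfl
    · have hj' : j = lines.length := by omega
      have : lines.drop j = [] := List.drop_eq_nil_of_le (by omega)
      rw [this, List.foldl_nil]
      rw [pvBGoI]
      simp only [hlt, dif_pos, ← hj, hjlt, dif_neg, not_false_iff]
  · have : lines.drop i = [] := List.drop_eq_nil_of_le (by omega)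
    rw [this]
    unfold pvBGoI
    simp [hlt]

-- ===== VERDICT =====
theorem parse_slvs_spec : Claim_equal_parse_slvs := by
  intro content _
  show _ = _
  unfold parse_slvs parse_slvs_alt
  rw [show ∀ (L : List String) init, L.foldl pvAStep init = (L.map PySem.Str.strip).foldl pvAStep0 init
      from fun L init => by rw [List.foldl_map]; rfl]
  have := pvMain (((PySem.Str.split? content "\n").getD []).map PySem.Str.strip) 0 (by omega) [] []
  simpa using this
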